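-- pv_equiv track=rewrite | github.com/JosueAmaral15/Egg-Cell-Compactor | Egg Cell Compactor 1.6.1+stable.py | __reduce_simple_xnor_terms
-- ===== SOURCE A (Python) =====
-- def __reduce_simple_xnor_terms(t1, t2):
--     """Try to reduce two terms t1 and t2, by combining them as XNOR terms.
--
--     Args:
--         t1 (str): a term.
--         t2 (str): a term.
--
--     Returns:
--         The reduced term or None if the terms cannot be reduced.
--     """
--     difft10 = 0
--     difft20 = 0
--     ret = []
--     '''
--     for (t1c, t2c) in zip(t1, t2):
--         if t1c == '^' or t2c == '^' or t1c == '~' or t2c == '~':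
--             return None
--         elif t1c != t2c:
--             ret.append('~')
--             if t1c == '0':
--                 difft10 += 1
--             else:
--                 difft20 += 1
--         else:
--             ret.append(t1c)
--     '''
--
--     count = 0
--     size = len(t1)
--     while count < size:
--       if t1[count] == '^' or t2[count] == '^' or t1[count] == '~' or t2[count] == '~':
--           return None
--       elif t1[count] != t2[count]:
--           ret.append('~')
--           if t1[count] == '0':
--               difft10 += 1
--           else:
--               difft20 += 1
--       else:
--           ret.append(t1[count])
--       count+=1
--
--     if (difft10 == 2 and difft20 == 0) or (difft10 == 0 and difft20 == 2):
--         return "".join(ret)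
--     return None
-- ===== SOURCE B (Python) =====
-- def __reduce_simple_xnor_terms(t1, t2):
--     """Locate the mismatch positions by repeated first-difference searches and
--     splice '~' into t1 at the two mismatches (no output accumulation)."""
--     n = len(t1)
--     if any(c in '^~' for c in t1) or any(t2[k] in '^~' for k in range(n)):
--         return None
--     i = _next_diff(t1, t2, 0)
--     if i == n:
--         return None
--     j = _next_diff(t1, t2, i + 1)
--     if j == n:
--         return None
--     if _next_diff(t1, t2, j + 1) != n:
--         return None
--     if (t1[i] == '0') != (t1[j] == '0'):
--         return None
--     return t1[:i] + '~' + t1[i+1:j] + '~' + t1[j+1:]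
--
-- def _next_diff(t1, t2, start):
--     for k in range(start, len(t1)):
--         if t1[k] != t2[k]:
--             return k
--     return len(t1)
-- ===== Notes on version B (the rewrite author's own statement) =====
-- stated objective: alternative
-- what changed: B abandons A's single accumulating pass with two difference counters: it first validates both terms, then locates mismatch positions by repeated first-difference searches (accepting exactly two of the same t1-bit class), and builds the result by splicing '~' into t1 at those two positions instead of accumulating an output list.
import Mathlib
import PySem

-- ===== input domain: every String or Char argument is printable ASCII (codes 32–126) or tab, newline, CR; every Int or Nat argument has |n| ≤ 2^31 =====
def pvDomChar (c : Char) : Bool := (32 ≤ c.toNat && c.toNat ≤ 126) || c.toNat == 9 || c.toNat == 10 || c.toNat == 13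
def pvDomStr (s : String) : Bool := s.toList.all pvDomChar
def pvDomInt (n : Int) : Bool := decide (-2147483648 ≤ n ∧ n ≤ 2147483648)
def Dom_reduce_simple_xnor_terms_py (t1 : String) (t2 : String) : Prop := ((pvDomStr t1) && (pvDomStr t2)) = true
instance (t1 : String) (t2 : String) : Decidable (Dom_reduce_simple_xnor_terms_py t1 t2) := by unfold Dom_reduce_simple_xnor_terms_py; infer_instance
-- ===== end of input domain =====

-- B replaces A's single accumulating pass with two counters by: a validity scan, repeated
-- first-difference searches locating the mismatch positions, and splicing '~' into t1 at the
-- two mismatches; objective: alternative (same cost). Equal return value wherever the Python A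
-- returns (Pre_ excludes exactly A's IndexError inputs).

-- ===== PORT A =====
-- the while-loop of A: count, difft10, difft20, ret are the Python locals; a `none` from
-- pyGet? is Python's IndexError (those inputs are excluded by Pre_)
def reduceA_loop (l1 l2 : List Char) (size count : Nat) (d10 d20 : Nat) (ret : List Char) :
    Option String :=
  if _h : count < size then
    match PySem.List.pyGet? l1 (count : Int) with
    | none => none   -- IndexError on t1[count] (unreachable: count < size = len t1)
    | some c1 =>
      if c1 = '^' then none   -- `or` short-circuits before touching t2[count]
      else
        match PySem.List.pyGet? l2 (count : Int) with
        | none => none   -- IndexError on t2[count]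
        | some c2 =>
          if c2 = '^' ∨ c1 = '~' ∨ c2 = '~' then none
          else if c1 ≠ c2 then
            if c1 = '0' then reduceA_loop l1 l2 size (count+1) (d10+1) d20 (ret ++ ['~'])
            else reduceA_loop l1 l2 size (count+1) d10 (d20+1) (ret ++ ['~'])
          else reduceA_loop l1 l2 size (count+1) d10 d20 (ret ++ [c1])
  else
    if (d10 = 2 ∧ d20 = 0) ∨ (d10 = 0 ∧ d20 = 2) then some (String.ofList ret) else none
termination_by size - count

def reduce_simple_xnor_terms_py (t1 : String) (t2 : String) : Option String :=
  reduceA_loop t1.toList t2.toList t1.toList.length 0 0 0 []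

-- ===== PORT B =====
-- any(c in '^~' for c in t1)
def pvAnyOp (l : List Char) : Bool := l.any (fun c => c == '^' || c == '~')

-- any(t2[k] in '^~' for k in range(n)): lazy scan; `none` = IndexError on t2[k]
def pvAnyOpIdx (l2 : List Char) (n k : Nat) : Option Bool :=
  if _h : k < n then
    match PySem.List.pyGet? l2 (k : Int) with
    | none => none
    | some c => if c == '^' || c == '~' then some true else pvAnyOpIdx l2 n (k+1)
  else some false
termination_by n - k

-- _next_diff: first k in [start, n) with t1[k] != t2[k], else n.  Reached only after the
-- validity scan returned False, so k < n implies both indices are in range and the plain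
-- getElem! accesses are exact transcriptions of t1[k] / t2[k].
def pvNextDiff (l1 l2 : List Char) (n k : Nat) : Nat :=
  if _h : k < n then
    if l1[k]! ≠ l2[k]! then k else pvNextDiff l1 l2 n (k+1)
  else n
termination_by n - k

-- t1[:i] + '~' + t1[i+1:j] + '~' + t1[j+1:]  (0 ≤ i < j < n, so take/drop are the exact slices)
def reduce_simple_xnor_terms_py_alt (t1 : String) (t2 : String) : Option String :=
  let l1 := t1.toList
  let l2 := t2.toList
  let n := l1.length
  if pvAnyOp l1 then none
  else
    match pvAnyOpIdx l2 n 0 with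
    | none => none        -- IndexError inside the t2 validity scan (outside Pre_)
    | some true => none
    | some false =>
      let i := pvNextDiff l1 l2 n 0
      if i = n then none
      else
        let j := pvNextDiff l1 l2 n (i+1)
        if j = n then none
        else
          if pvNextDiff l1 l2 n (j+1) ≠ n then none
          else if (l1[i]! == '0') != (l1[j]! == '0') then none
          else some (String.ofList
            (l1.take i ++ '~' :: ((l1.drop (i+1)).take (j-(i+1)) ++ '~' :: l1.drop (j+1))))

-- ===== PRECONDITION & SPEC =====
-- Pre_ is exactly "the Python A returns (no IndexError)": t2 covers t1, or an operator char /
-- a '^' at index len(t2) makes A return None before the out-of-range access of t2.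
def Pre_reduce_simple_xnor_terms_py (t1 : String) (t2 : String) : Prop :=
  t1.toList.length ≤ t2.toList.length ∨
  ((t1.toList.zip t2.toList).any
      (fun p => p.1 == '^' || p.1 == '~' || p.2 == '^' || p.2 == '~')) = true ∨
  t1.toList[t2.toList.length]? = some '^'
instance (t1 : String) (t2 : String) : Decidable (Pre_reduce_simple_xnor_terms_py t1 t2) := by
  unfold Pre_reduce_simple_xnor_terms_py; infer_instance

def pvWitness_reduce_simple_xnor_terms_py : String × String := ("100", "001")

def Spec_reduce_simple_xnor_terms_py (t1 : String) (t2 : String) (out : Option String) : Prop :=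
  out = reduce_simple_xnor_terms_py_alt t1 t2
instance (t1 : String) (t2 : String) (out : Option String) :
    Decidable (Spec_reduce_simple_xnor_terms_py t1 t2 out) := by
  unfold Spec_reduce_simple_xnor_terms_py; infer_instance

-- ===== CLAIM (what is proved, stated in full; the proofs are below) =====
def Claim_equal_reduce_simple_xnor_terms_py : Prop :=
  ∀ (t1 : String) (t2 : String), Dom_reduce_simple_xnor_terms_py t1 t2 →
    Pre_reduce_simple_xnor_terms_py t1 t2 →
    Spec_reduce_simple_xnor_terms_py t1 t2 (reduce_simple_xnor_terms_py t1 t2)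

-- ===== LEMMAS AND PROOFS =====

-- an operator character ('^' or '~')
def pvInv (c : Char) : Prop := c = '^' ∨ c = '~'

-- If some reachable position carries an operator character, A's loop returns none.
theorem reduceA_loop_none (l1 l2 : List Char) (n : Nat) (hn : n = l1.length) :
    ∀ k i d10 d20 acc, n - i = k →
    (∃ j, i ≤ j ∧ j < n ∧ ((∃ c, l1[j]? = some c ∧ pvInv c) ∨ (∃ c, l2[j]? = some c ∧ pvInv c))) →
    reduceA_loop l1 l2 n i d10 d20 acc = none := by
  intro k
  induction k with
  | zero =>
    intro i d10 d20 acc hk ⟨j, hij, hjn, _⟩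
    omega
  | succ k ih =>
    intro i d10 d20 acc hk hbad
    obtain ⟨j, hij, hjn, hj⟩ := hbad
    have hin : i < n := by omega
    rw [reduceA_loop, dif_pos hin]
    have hi1 : i < l1.length := by omega
    have h1 : PySem.List.pyGet? l1 (i : Int) = some l1[i] := by
      simp [PySem.List.pyGet?_natCast, List.getElem?_eq_getElem hi1]
    rw [h1]; dsimp only
    by_cases hc1 : l1[i] = '^'
    · simp [hc1]
    · rw [if_neg hc1]
      cases h2 : PySem.List.pyGet? l2 (i : Int) with
      | none => rfl
      | some c2 =>
        dsimp only
        have h2' : l2[i]? = some c2 := by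
          rw [PySem.List.pyGet?_natCast] at h2; exact h2
        by_cases hop : c2 = '^' ∨ l1[i] = '~' ∨ c2 = '~'
        · rw [if_pos hop]
        · rw [if_neg hop]
          have hji : j ≠ i := by
            rintro rfl
            rcases hj with ⟨c, hc, hcinv⟩ | ⟨c, hc, hcinv⟩
            · rw [List.getElem?_eq_getElem hi1] at hc
              cases hc
              rcases hcinv with h | h
              · exact hc1 h
              · exact hop (Or.inr (Or.inl h))
            · rw [h2'] at hc
              cases hc
              rcases hcinv with h | h
              · exact hop (Or.inl h)
              · exact hop (Or.inr (Or.inr h))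
          have hbad' : ∃ j, i + 1 ≤ j ∧ j < n ∧
              ((∃ c, l1[j]? = some c ∧ pvInv c) ∨ (∃ c, l2[j]? = some c ∧ pvInv c)) :=
            ⟨j, by omega, hjn, hj⟩
          by_cases hne : l1[i] ≠ c2
          · rw [if_pos hne]
            by_cases h0 : l1[i] = '0'
            · rw [if_pos h0]; exact ih (i+1) _ _ _ (by omega) hbad'
            · rw [if_neg h0]; exact ih (i+1) _ _ _ (by omega) hbad'
          · rw [if_neg hne]; exact ih (i+1) _ _ _ (by omega) hbad'

-- proof-side decision: exactly two collected diff bits, of the same class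
def pvDecide (bits combined : List Char) : Option String :=
  match bits with
  | [a, b] => if (a = '0') = (b = '0') then some (String.ofList combined) else none
  | _ => none

-- proof-side collection pass: combined / diff-bit accumulators; `none` = IndexError
def collectLoop (l1 l2 : List Char) (n i : Nat) (combined : List Char) (bits : List Char) :
    Option String :=
  if _h : i < n then
    match PySem.List.pyGet? l1 (i : Int), PySem.List.pyGet? l2 (i : Int) with
    | some c1, some c2 =>
      if c1 = c2 then collectLoop l1 l2 n (i+1) (combined ++ [c1]) bits
      else collectLoop l1 l2 n (i+1) (combined ++ ['~']) (bits ++ [c1])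
    | _, _ => none
  else pvDecide bits combined
termination_by n - i

-- the final decisions agree: counters (2,0)/(0,2) ↔ two collected bits of one class
theorem final_eq (bits : List Char) (ret : List Char) :
    (if (bits.countP (· == '0') = 2 ∧ bits.countP (fun c => !(c == '0')) = 0) ∨
        (bits.countP (· == '0') = 0 ∧ bits.countP (fun c => !(c == '0')) = 2)
     then some (String.ofList ret) else (none : Option String)) = pvDecide bits ret := by
  unfold pvDecide
  match bits with
  | [] => simp
  | [a] =>
    by_cases h : a = '0' <;> simp [h]
  | [a, b] =>
    by_cases ha : a = '0' <;> by_cases hb : b = '0' <;>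
      simp [ha, hb]
  | a :: b :: c :: rest =>
    have hsum : ∀ (l : List Char),
        l.countP (· == '0') + l.countP (fun c => !(c == '0')) = l.length := by
      intro l
      induction l with
      | nil => simp
      | cons x xs ihx => by_cases hx : x = '0' <;> simp [hx] <;> omega
    have := hsum (a :: b :: c :: rest)
    simp only [List.length_cons] at this
    rw [if_neg (by omega)]

-- With no operator character in range, A's loop and the collection pass agree,
-- A's counters being the two class counts of the collected bits.
theorem reduceAB_loop (l1 l2 : List Char) (n : Nat) (hn : n = l1.length)
    (h1 : ∀ j, j < n → ¬ pvInv l1[j]!)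
    (h2 : ∀ j, j < n → ∀ c, l2[j]? = some c → ¬ pvInv c) :
    ∀ k i acc bits, n - i = k →
    reduceA_loop l1 l2 n i (bits.countP (· == '0')) (bits.countP (fun c => !(c == '0'))) acc
      = collectLoop l1 l2 n i acc bits := by
  intro k
  induction k with
  | zero =>
    intro i acc bits hk
    have hin : ¬ i < n := by omega
    rw [reduceA_loop, dif_neg hin, collectLoop, dif_neg hin]
    exact final_eq bits acc
  | succ k ih =>
    intro i acc bits hk
    have hin : i < n := by omega
    rw [reduceA_loop, dif_pos hin, collectLoop, dif_pos hin]
    have hi1 : i < l1.length := by omega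
    have hg1 : PySem.List.pyGet? l1 (i : Int) = some l1[i] := by
      simp [PySem.List.pyGet?_natCast, List.getElem?_eq_getElem hi1]
    rw [hg1]; dsimp only
    have hinv1 : ¬ pvInv l1[i] := by
      have := h1 i hin
      rwa [getElem!_pos l1 i hi1] at this
    have hc1 : ¬ l1[i] = '^' := fun h => hinv1 (Or.inl h)
    rw [if_neg hc1]
    cases hg2 : PySem.List.pyGet? l2 (i : Int) with
    | none => rfl
    | some c2 =>
      dsimp only
      have h2' : l2[i]? = some c2 := by rw [PySem.List.pyGet?_natCast] at hg2; exact hg2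
      have hinv2 : ¬ pvInv c2 := h2 i hin c2 h2'
      have hop : ¬ (c2 = '^' ∨ l1[i] = '~' ∨ c2 = '~') := by
        rintro (h | h | h)
        · exact hinv2 (Or.inl h)
        · exact hinv1 (Or.inr h)
        · exact hinv2 (Or.inr h)
      rw [if_neg hop]
      by_cases heq : l1[i] = c2
      · rw [if_neg (by simpa using heq), if_pos heq]
        exact ih (i+1) (acc ++ [l1[i]]) bits (by omega)
      · rw [if_pos heq, if_neg heq]
        by_cases h0 : l1[i] = '0'
        · rw [if_pos h0]
          have := ih (i+1) (acc ++ ['~']) (bits ++ [l1[i]]) (by omega)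
          simpa [List.countP_append, h0] using this
        · rw [if_neg h0]
          have := ih (i+1) (acc ++ ['~']) (bits ++ [l1[i]]) (by omega)
          simpa [List.countP_append, h0] using this

-- pointwise combined term and the t1-bits at differing positions, over the zipped suffix
def pvComb (zs : List (Char × Char)) : List Char :=
  zs.map (fun pr => if pr.1 = pr.2 then pr.1 else '~')
def pvDbits (zs : List (Char × Char)) : List Char :=
  (zs.filter (fun pr => pr.1 != pr.2)).map Prod.fst

-- the collection pass computes pvDecide of the diff bits and the combined term
theorem collect_char (l1 l2 : List Char) (n : Nat) (hn : n = l1.length)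
    (hlen : n ≤ l2.length) :
    ∀ k i acc bits, n - i = k →
    collectLoop l1 l2 n i acc bits
      = pvDecide (bits ++ pvDbits ((l1.zip l2).drop i)) (acc ++ pvComb ((l1.zip l2).drop i)) := by
  have hz : (l1.zip l2).length = n := by simp [List.length_zip]; omega
  intro k
  induction k with
  | zero =>
    intro i acc bits hk
    have hin : ¬ i < n := by omega
    rw [collectLoop, dif_neg hin]
    rw [List.drop_eq_nil_of_le (by omega)]
    simp [pvDbits, pvComb]
  | succ k ih =>
    intro i acc bits hk
    have hin : i < n := by omega
    have hi1 : i < l1.length := by omega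
    have hi2 : i < l2.length := by omega
    rw [collectLoop, dif_pos hin]
    have hg1 : PySem.List.pyGet? l1 (i : Int) = some l1[i] := by
      simp [PySem.List.pyGet?_natCast, List.getElem?_eq_getElem hi1]
    have hg2 : PySem.List.pyGet? l2 (i : Int) = some l2[i] := by
      simp [PySem.List.pyGet?_natCast, List.getElem?_eq_getElem hi2]
    rw [hg1, hg2]; dsimp only
    have hdrop : (l1.zip l2).drop i = (l1[i], l2[i]) :: (l1.zip l2).drop (i+1) := by
      rw [List.drop_eq_getElem_cons (by omega : i < (l1.zip l2).length)]
      rw [List.getElem_zip]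
    by_cases heq : l1[i] = l2[i]
    · rw [if_pos heq, ih (i+1) _ _ (by omega)]
      rw [hdrop]
      simp [pvDbits, pvComb, heq]
    · rw [if_neg heq, ih (i+1) _ _ (by omega)]
      rw [hdrop]
      simp [pvDbits, pvComb, heq]

-- ----- pvNextDiff characterization -----

theorem nd_ge (l1 l2 : List Char) (n : Nat) :
    ∀ k s, n - s = k → s ≤ n → s ≤ pvNextDiff l1 l2 n s ∧ pvNextDiff l1 l2 n s ≤ n := by
  intro k
  induction k with
  | zero =>
    intro s hk hsn
    rw [pvNextDiff, dif_neg (by omega)]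
    omega
  | succ k ih =>
    intro s hk hsn
    have hs : s < n := by omega
    rw [pvNextDiff, dif_pos hs]
    by_cases hd : l1[s]! ≠ l2[s]!
    · rw [if_pos hd]; omega
    · rw [if_neg hd]
      have := ih (s+1) (by omega) (by omega)
      omega

theorem nd_eqrange (l1 l2 : List Char) (n : Nat) :
    ∀ k s, n - s = k → ∀ m, s ≤ m → m < pvNextDiff l1 l2 n s → l1[m]! = l2[m]! := by
  intro k
  induction k with
  | zero =>
    intro s hk m hm1 hm2
    rw [pvNextDiff, dif_neg (by omega)] at hm2
    omega
  | succ k ih =>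
    intro s hk m hm1 hm2
    have hs : s < n := by omega
    rw [pvNextDiff, dif_pos hs] at hm2
    by_cases hd : l1[s]! ≠ l2[s]!
    · rw [if_pos hd] at hm2; omega
    · rw [if_neg hd] at hm2
      rcases Nat.eq_or_lt_of_le hm1 with rfl | hlt
      · exact not_not.mp hd
      · exact ih (s+1) (by omega) m hlt hm2

theorem nd_diff (l1 l2 : List Char) (n : Nat) :
    ∀ k s, n - s = k → pvNextDiff l1 l2 n s < n →
      l1[pvNextDiff l1 l2 n s]! ≠ l2[pvNextDiff l1 l2 n s]! := by
  intro k
  induction k with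
  | zero =>
    intro s hk h
    rw [pvNextDiff, dif_neg (by omega)] at h
    exact absurd h (lt_irrefl n)
  | succ k ih =>
    intro s hk h
    have hs : s < n := by omega
    rw [pvNextDiff, dif_pos hs] at h ⊢
    by_cases hd : l1[s]! ≠ l2[s]!
    · rw [if_pos hd] at h ⊢; exact hd
    · rw [if_neg hd] at h ⊢; exact ih (s+1) (by omega) h

-- the filtered diff list of a suffix, in terms of the first difference
theorem nd_filter (l1 l2 : List Char) (n : Nat) (hn : n = l1.length) (hlen : n ≤ l2.length) :
    ∀ k s, n - s = k →
    ((l1.zip l2).drop s).filter (fun pr => pr.1 != pr.2)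
      = if pvNextDiff l1 l2 n s < n then
          (l1[pvNextDiff l1 l2 n s]!, l2[pvNextDiff l1 l2 n s]!)
            :: ((l1.zip l2).drop (pvNextDiff l1 l2 n s + 1)).filter (fun pr => pr.1 != pr.2)
        else [] := by
  have hz : (l1.zip l2).length = n := by simp [List.length_zip]; omega
  intro k
  induction k with
  | zero =>
    intro s hk
    rw [pvNextDiff, dif_neg (by omega)]
    rw [List.drop_eq_nil_of_le (by omega), if_neg (by omega)]
    rfl
  | succ k ih =>
    intro s hk
    have hs : s < n := by omega
    have hdrop : (l1.zip l2).drop s = (l1[s], l2[s]) :: (l1.zip l2).drop (s+1) := by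
      rw [List.drop_eq_getElem_cons (by omega : s < (l1.zip l2).length)]
      rw [List.getElem_zip]
    have hb1 : l1[s]! = l1[s] := getElem!_pos l1 s (by omega)
    have hb2 : l2[s]! = l2[s] := getElem!_pos l2 s (by omega)
    rw [pvNextDiff, dif_pos hs]
    by_cases hd : l1[s]! ≠ l2[s]!
    · rw [if_pos hd, if_pos hs, hdrop]
      rw [List.filter_cons_of_pos (by simp [hb1, hb2] at hd ⊢; exact hd), hb1, hb2]
    · rw [if_neg hd]
      rw [hdrop, List.filter_cons_of_neg (by simp [hb1, hb2] at hd ⊢; exact hd)]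
      exact ih (s+1) (by omega)

-- a combined segment with no differences is the t1 segment
theorem comb_eq_fst (zs : List (Char × Char)) (h : ∀ pr ∈ zs, pr.1 = pr.2) :
    pvComb zs = zs.map Prod.fst := by
  unfold pvComb
  exact List.map_eq_map_iff.mpr (fun pr hpr => by rw [if_pos (h pr hpr)])

-- a completed validity scan certifies every scanned index of t2
theorem anyIdx_false_spec (l2 : List Char) (n : Nat) :
    ∀ k s, n - s = k → pvAnyOpIdx l2 n s = some false →
    ∀ m, s ≤ m → m < n → ∃ c, l2[m]? = some c ∧ (c == '^' || c == '~') = false := by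
  intro k
  induction k with
  | zero =>
    intro s hk _ m hm1 hm2
    omega
  | succ k ih =>
    intro s hk hscan m hm1 hm2
    have hs : s < n := by omega
    rw [pvAnyOpIdx, dif_pos hs] at hscan
    cases hg : PySem.List.pyGet? l2 (s : Int) with
    | none => rw [hg] at hscan; cases hscan
    | some c =>
      rw [hg] at hscan; dsimp only at hscan
      by_cases hopc : (c == '^' || c == '~') = true
      · rw [if_pos hopc] at hscan; cases hscan
      · rw [if_neg hopc] at hscan
        rcases Nat.eq_or_lt_of_le hm1 with rfl | hlt
        · exact ⟨c, by rwa [PySem.List.pyGet?_natCast] at hg, by simpa using hopc⟩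
        · exact ih (s+1) (by omega) hscan m hlt hm2

-- an aborted validity scan pinpoints an operator character of t2
theorem anyIdx_true_spec (l2 : List Char) (n : Nat) :
    ∀ k s, n - s = k → pvAnyOpIdx l2 n s = some true →
    ∃ m, s ≤ m ∧ m < n ∧ ∃ c, l2[m]? = some c ∧ (c == '^' || c == '~') = true := by
  intro k
  induction k with
  | zero =>
    intro s hk hscan
    rw [pvAnyOpIdx, dif_neg (by omega)] at hscan
    cases hscan
  | succ k ih =>
    intro s hk hscan
    have hs : s < n := by omega
    rw [pvAnyOpIdx, dif_pos hs] at hscan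
    cases hg : PySem.List.pyGet? l2 (s : Int) with
    | none => rw [hg] at hscan; cases hscan
    | some c =>
      rw [hg] at hscan; dsimp only at hscan
      by_cases hopc : (c == '^' || c == '~') = true
      · exact ⟨s, le_refl s, hs, c, by rwa [PySem.List.pyGet?_natCast] at hg, hopc⟩
      · rw [if_neg hopc] at hscan
        obtain ⟨m, hm1, hm2, hc⟩ := ih (s+1) (by omega) hscan
        exact ⟨m, by omega, hm2, hc⟩

-- if the validity scan hits an IndexError, A's loop does too (given an operator-free t1)
theorem A_none_of_scan_err (l1 l2 : List Char) (n : Nat) (hn : n = l1.length)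
    (hop1 : ∀ c ∈ l1, (c == '^' || c == '~') = false) :
    ∀ k s d10 d20 acc, n - s = k → pvAnyOpIdx l2 n s = none →
    reduceA_loop l1 l2 n s d10 d20 acc = none := by
  intro k
  induction k with
  | zero =>
    intro s d10 d20 acc hk hscan
    rw [pvAnyOpIdx, dif_neg (by omega)] at hscan
    cases hscan
  | succ k ih =>
    intro s d10 d20 acc hk hscan
    have hs : s < n := by omega
    have hs1 : s < l1.length := by omega
    rw [pvAnyOpIdx, dif_pos hs] at hscan
    rw [reduceA_loop, dif_pos hs]
    have hg1 : PySem.List.pyGet? l1 (s : Int) = some l1[s] := by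
      simp [PySem.List.pyGet?_natCast, List.getElem?_eq_getElem hs1]
    rw [hg1]; dsimp only
    have hops : (l1[s] == '^' || l1[s] == '~') = false := hop1 l1[s] (l1.getElem_mem hs1)
    have hc1 : ¬ l1[s] = '^' := by simp at hops; exact fun h => hops.1 (by rw [h])
    rw [if_neg hc1]
    cases hg2 : PySem.List.pyGet? l2 (s : Int) with
    | none => rfl
    | some c2 =>
      rw [hg2] at hscan; dsimp only at hscan ⊢
      by_cases hopc : (c2 == '^' || c2 == '~') = true
      · rw [if_pos hopc] at hscan; cases hscan
      · rw [if_neg hopc] at hscan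
        have hop : ¬ (c2 = '^' ∨ l1[s] = '~' ∨ c2 = '~') := by
          simp at hops hopc
          rintro (h | h | h)
          · exact hopc.1 (by rw [h])
          · exact hops.2 (by rw [h])
          · exact hopc.2 (by rw [h])
        rw [if_neg hop]
        by_cases hne : l1[s] ≠ c2
        · rw [if_pos hne]
          by_cases h0 : l1[s] = '0'
          · rw [if_pos h0]; exact ih (s+1) _ _ _ (by omega) hscan
          · rw [if_neg h0]; exact ih (s+1) _ _ _ (by omega) hscan
        · rw [if_neg hne]; exact ih (s+1) _ _ _ (by omega) hscan

-- an all-equal zipped segment combines to the corresponding t1 segment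
theorem comb_seg (l1 l2 : List Char) (n : Nat) (hn : n = l1.length) (hlen : n ≤ l2.length)
    (s len : Nat) (h : ∀ m, s ≤ m → m < s + len → m < n → l1[m]! = l2[m]!) :
    pvComb (((l1.zip l2).drop s).take len) = (l1.drop s).take len := by
  have hz : (l1.zip l2).length = n := by simp [List.length_zip]; omega
  have h1 : pvComb (((l1.zip l2).drop s).take len)
      = (((l1.zip l2).drop s).take len).map Prod.fst := by
    apply comb_eq_fst
    intro pr hpr
    obtain ⟨m, hm, hel⟩ := List.mem_iff_getElem.mp hpr
    have hmlen : m < len := by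
      have := hm; rw [List.length_take] at this; omega
    have hmz : s + m < (l1.zip l2).length := by
      have := hm; rw [List.length_take, List.length_drop] at this; omega
    have : pr = (l1.zip l2)[s + m]'hmz := by
      rw [← hel, List.getElem_take, List.getElem_drop]
    rw [this, List.getElem_zip]
    have hb1 : l1[s+m]! = l1[s+m]'(by omega) := getElem!_pos l1 (s+m) (by omega)
    have hb2 : l2[s+m]! = l2[s+m]'(by omega) := getElem!_pos l2 (s+m) (by omega)
    have := h (s+m) (by omega) (by omega) (by omega)
    rw [hb1, hb2] at this
    exact this
  rw [h1, List.map_take, List.map_drop, List.map_fst_zip (show l1.length ≤ l2.length by omega)]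

-- the combined term when the differences are exactly positions i < j: splice '~' into t1
theorem comb_splice (l1 l2 : List Char) (n : Nat) (hn : n = l1.length) (hlen : n ≤ l2.length)
    (i j : Nat) (hi : i < n) (hij : i < j) (hj : j < n)
    (hlow : ∀ m, m < i → l1[m]! = l2[m]!)
    (hmid : ∀ m, i < m → m < j → l1[m]! = l2[m]!)
    (hhigh : ∀ m, j < m → m < n → l1[m]! = l2[m]!)
    (hdi : l1[i]! ≠ l2[i]!) (hdj : l1[j]! ≠ l2[j]!) :
    pvComb (l1.zip l2)
      = l1.take i ++ '~' :: ((l1.drop (i+1)).take (j-(i+1)) ++ '~' :: l1.drop (j+1)) := by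
  have hz : (l1.zip l2).length = n := by simp [List.length_zip]; omega
  have hdecomp : l1.zip l2
      = (l1.zip l2).take i
        ++ (l1.zip l2)[i] :: (((l1.zip l2).drop (i+1)).take (j-(i+1))
        ++ (l1.zip l2)[j]'(by omega) :: (l1.zip l2).drop (j+1)) := by
    have e1 : (l1.zip l2).drop i = (l1.zip l2)[i] :: (l1.zip l2).drop (i+1) :=
      List.drop_eq_getElem_cons (by omega)
    have e2 : ((l1.zip l2).drop (i+1)).take (j-(i+1)) ++ (l1.zip l2).drop j
        = (l1.zip l2).drop (i+1) := by
      have := List.drop_take_append_drop (l1.zip l2) (i+1) (j-(i+1))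
      rwa [show i+1+(j-(i+1)) = j from by omega] at this
    have e3 : (l1.zip l2).drop j = (l1.zip l2)[j]'(by omega) :: (l1.zip l2).drop (j+1) :=
      List.drop_eq_getElem_cons (by omega)
    conv_lhs => rw [← List.take_append_drop i (l1.zip l2), e1, ← e2, e3]
  have hgi : ((l1.zip l2)[i]'(by omega)) = (l1[i]'(by omega), l2[i]'(by omega)) :=
    List.getElem_zip
  have hgj : ((l1.zip l2)[j]'(by omega)) = (l1[j]'(by omega), l2[j]'(by omega)) :=
    List.getElem_zip
  have hbi1 : l1[i]! = l1[i]'(by omega) := getElem!_pos l1 i (by omega)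
  have hbi2 : l2[i]! = l2[i]'(by omega) := getElem!_pos l2 i (by omega)
  have hbj1 : l1[j]! = l1[j]'(by omega) := getElem!_pos l1 j (by omega)
  have hbj2 : l2[j]! = l2[j]'(by omega) := getElem!_pos l2 j (by omega)
  have hne_i : ¬ (l1[i]'(by omega) = l2[i]'(by omega)) := by
    rw [← hbi1, ← hbi2]; exact hdi
  have hne_j : ¬ (l1[j]'(by omega) = l2[j]'(by omega)) := by
    rw [← hbj1, ← hbj2]; exact hdj
  have hseg1 : pvComb ((l1.zip l2).take i) = l1.take i := by
    have := comb_seg l1 l2 n hn hlen 0 i (fun m _ hm _ => hlow m (by omega))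
    rwa [List.drop_zero, List.drop_zero] at this
  have hseg2 : pvComb (((l1.zip l2).drop (i+1)).take (j-(i+1)))
      = (l1.drop (i+1)).take (j-(i+1)) :=
    comb_seg l1 l2 n hn hlen (i+1) (j-(i+1)) (fun m h1 h2 _ => hmid m (by omega) (by omega))
  have hseg3 : pvComb ((l1.zip l2).drop (j+1)) = l1.drop (j+1) := by
    have htk : ((l1.zip l2).drop (j+1)).take (n-(j+1)) = (l1.zip l2).drop (j+1) := by
      apply List.take_of_length_le
      rw [List.length_drop]; omega
    have := comb_seg l1 l2 n hn hlen (j+1) (n-(j+1))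
      (fun m h1 h2 h3 => hhigh m (by omega) h3)
    rw [htk] at this
    rw [this]
    apply List.take_of_length_le
    rw [List.length_drop]; omega
  rw [hdecomp]
  unfold pvComb at hseg1 hseg2 hseg3 ⊢
  rw [List.map_append, List.map_cons, List.map_append, List.map_cons]
  rw [hseg1, hseg2, hseg3, hgi, hgj]
  simp [hne_i, hne_j]

theorem ports_eq (t1 t2 : String) :
    reduce_simple_xnor_terms_py t1 t2 = reduce_simple_xnor_terms_py_alt t1 t2 := by
  unfold reduce_simple_xnor_terms_py reduce_simple_xnor_terms_py_alt
  set l1 := t1.toList with hl1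
  set l2 := t2.toList with hl2
  set n := l1.length with hn
  by_cases hop1 : pvAnyOp l1 = true
  · rw [if_pos hop1]
    apply reduceA_loop_none l1 l2 n hn (n - 0) 0 0 0 [] rfl
    obtain ⟨c, hc, hcp⟩ := List.any_eq_true.mp hop1
    obtain ⟨m, hm, rfl⟩ := List.mem_iff_getElem.mp hc
    refine ⟨m, Nat.zero_le _, by omega, Or.inl ⟨l1[m], List.getElem?_eq_getElem hm, ?_⟩⟩
    rcases Bool.or_eq_true_iff.mp hcp with h' | h'
    · exact Or.inl (by simpa using h')
    · exact Or.inr (by simpa using h')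
  · rw [if_neg hop1]
    have hop1' : ∀ c ∈ l1, (c == '^' || c == '~') = false := by
      intro c hc
      cases hcc : (c == '^' || c == '~') with
      | false => rfl
      | true => exact absurd (List.any_eq_true.mpr ⟨c, hc, hcc⟩) hop1
    cases hscan : pvAnyOpIdx l2 n 0 with
    | none =>
      exact A_none_of_scan_err l1 l2 n hn hop1' (n - 0) 0 0 0 [] rfl hscan
    | some b =>
      cases b with
      | true =>
        apply reduceA_loop_none l1 l2 n hn (n - 0) 0 0 0 [] rfl
        obtain ⟨m, _, hm2, c, hc, hcp⟩ := anyIdx_true_spec l2 n (n - 0) 0 rfl hscan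
        refine ⟨m, Nat.zero_le _, hm2, Or.inr ⟨c, hc, ?_⟩⟩
        rcases Bool.or_eq_true_iff.mp hcp with h' | h'
        · exact Or.inl (by simpa using h')
        · exact Or.inr (by simpa using h')
      | false =>
        dsimp only
        -- the scan succeeded: t2 covers t1 and carries no operator in range
        have hsp := anyIdx_false_spec l2 n (n - 0) 0 rfl hscan
        have hlen : n ≤ l2.length := by
          rcases Nat.eq_zero_or_pos n with h0 | h0
          · omega
          · obtain ⟨c, hc, _⟩ := hsp (n-1) (by omega) (by omega)
            obtain ⟨hlt, -⟩ := List.getElem?_eq_some_iff.mp hc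
            omega
        have hA1 : ∀ m, m < n → ¬ pvInv l1[m]! := by
          intro m hm hinv
          have hb : l1[m]! = l1[m]'(by omega) := getElem!_pos l1 m (by omega)
          have := hop1' (l1[m]'(by omega)) (l1.getElem_mem (by omega))
          simp at this
          rcases hinv with h | h <;> rw [hb] at h
          · exact this.1 (by rw [h])
          · exact this.2 (by rw [h])
        have hA2 : ∀ m, m < n → ∀ c, l2[m]? = some c → ¬ pvInv c := by
          intro m hm c hc hinv
          obtain ⟨c', hc', hf⟩ := hsp m (Nat.zero_le m) hm
          rw [hc'] at hc
          cases hc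
          simp at hf
          rcases hinv with h | h
          · exact hf.1 (by rw [h])
          · exact hf.2 (by rw [h])
        -- A's loop = collection pass = pvDecide of diff bits / combined term
        have hAcoll : reduceA_loop l1 l2 n 0 0 0 []
            = pvDecide (pvDbits (l1.zip l2)) (pvComb (l1.zip l2)) := by
          have h1 := reduceAB_loop l1 l2 n hn hA1 hA2 (n - 0) 0 [] [] rfl
          simp only [List.countP_nil] at h1
          rw [h1, collect_char l1 l2 n hn hlen (n - 0) 0 [] [] rfl]
          simp
        rw [hAcoll]
        -- now compare with B's first-difference searches
        have hfil0 := nd_filter l1 l2 n hn hlen (n - 0) 0 rfl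
        rw [List.drop_zero] at hfil0
        set i := pvNextDiff l1 l2 n 0 with hidef
        have hi_le : i ≤ n := (nd_ge l1 l2 n (n - 0) 0 rfl (Nat.zero_le n)).2
        by_cases hi : i = n
        · rw [if_pos hi]
          rw [if_neg (by omega)] at hfil0
          unfold pvDecide pvDbits
          rw [hfil0]
          rfl
        · rw [if_neg hi]
          have hi' : i < n := by omega
          rw [if_pos hi'] at hfil0
          have hfil1 := nd_filter l1 l2 n hn hlen (n - (i+1)) (i+1) rfl
          set j := pvNextDiff l1 l2 n (i+1) with hjdef
          have hj_ge : i + 1 ≤ j ∧ j ≤ n := nd_ge l1 l2 n (n - (i+1)) (i+1) rfl (by omega)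
          by_cases hj : j = n
          · rw [if_pos hj]
            rw [if_neg (by omega)] at hfil1
            unfold pvDecide pvDbits
            rw [hfil0, hfil1]
            rfl
          · rw [if_neg hj]
            have hj' : j < n := by omega
            rw [if_pos hj'] at hfil1
            have hfil2 := nd_filter l1 l2 n hn hlen (n - (j+1)) (j+1) rfl
            set kk := pvNextDiff l1 l2 n (j+1) with hkdef
            have hk_ge : j + 1 ≤ kk ∧ kk ≤ n := nd_ge l1 l2 n (n - (j+1)) (j+1) rfl (by omega)
            by_cases hkk : kk = n
            · rw [if_neg (by omega : ¬ kk ≠ n)]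
              rw [if_neg (by omega)] at hfil2
              have hbits : pvDbits (l1.zip l2) = [l1[i]!, l1[j]!] := by
                unfold pvDbits
                rw [hfil0, hfil1, hfil2]
                rfl
              -- both sides return the combined/spliced string under the same class test
              have hdi := nd_diff l1 l2 n (n - 0) 0 rfl (by rw [← hidef]; omega)
              have hdj := nd_diff l1 l2 n (n - (i+1)) (i+1) rfl (by rw [← hjdef]; omega)
              rw [← hidef] at hdi
              rw [← hjdef] at hdj
              have hcomb : pvComb (l1.zip l2)
                  = l1.take i ++ '~' :: ((l1.drop (i+1)).take (j-(i+1)) ++ '~' :: l1.drop (j+1)) := by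
                apply comb_splice l1 l2 n hn hlen i j hi' (by omega) hj'
                · intro m hm
                  exact nd_eqrange l1 l2 n (n - 0) 0 rfl m (Nat.zero_le m) (by omega)
                · intro m hm1 hm2
                  exact nd_eqrange l1 l2 n (n - (i+1)) (i+1) rfl m (by omega) (by omega)
                · intro m hm1 hm2
                  exact nd_eqrange l1 l2 n (n - (j+1)) (j+1) rfl m (by omega) (by omega)
                · exact hdi
                · exact hdj
              rw [hbits]
              unfold pvDecide
              rw [hcomb]
              by_cases ha : l1[i]! = '0' <;> by_cases hb : l1[j]! = '0' <;>
                simp [ha, hb]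
            · rw [if_pos (by omega : kk ≠ n)]
              have hkk' : kk < n := by omega
              rw [if_pos hkk'] at hfil2
              unfold pvDecide pvDbits
              rw [hfil0, hfil1, hfil2]
              rfl

-- ===== VERDICT (by name: the statement is the Claim_ definition above) =====
theorem reduce_simple_xnor_terms_py_spec : Claim_equal_reduce_simple_xnor_terms_py := by
  intro t1 t2 _ _
  unfold Spec_reduce_simple_xnor_terms_py
  exact ports_eq t1 t2
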